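-- pv_equiv track=rewrite | github.com/snjdck/Aladdin | src/_tools/agal/agalc.py | calcUsedRange
-- ===== SOURCE A (Python) =====
-- FLAG_W = 2
--
-- def calcUsedRange(usage):
-- 	used = []
-- 	index = usage[0][0]
-- 	for i in range(1, len(usage)):
-- 		if usage[i][1] == FLAG_W:
-- 			used.append((index, usage[i-1][0]))
-- 			index = usage[i][0]
-- 	used.append((index, usage[-1][0]))
-- 	return used
-- ===== SOURCE B (Python) =====
-- FLAG_W = 2
--
-- def calcUsedRange(usage):
-- 	breaks = [0] + [i for i in range(1, len(usage)) if usage[i][1] == FLAG_W]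
-- 	used = [(usage[a][0], usage[b - 1][0]) for a, b in zip(breaks, breaks[1:])]
-- 	used.append((usage[breaks[-1]][0], usage[-1][0]))
-- 	return used
-- ===== Notes on version B (the rewrite author's own statement) =====
-- stated objective: alternative
-- what changed: Replaces the rolling `index` accumulator with a two-pass decomposition: first compute the table of segment break indices, then emit ranges by pairing consecutive breaks with zip.
import Mathlib
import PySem

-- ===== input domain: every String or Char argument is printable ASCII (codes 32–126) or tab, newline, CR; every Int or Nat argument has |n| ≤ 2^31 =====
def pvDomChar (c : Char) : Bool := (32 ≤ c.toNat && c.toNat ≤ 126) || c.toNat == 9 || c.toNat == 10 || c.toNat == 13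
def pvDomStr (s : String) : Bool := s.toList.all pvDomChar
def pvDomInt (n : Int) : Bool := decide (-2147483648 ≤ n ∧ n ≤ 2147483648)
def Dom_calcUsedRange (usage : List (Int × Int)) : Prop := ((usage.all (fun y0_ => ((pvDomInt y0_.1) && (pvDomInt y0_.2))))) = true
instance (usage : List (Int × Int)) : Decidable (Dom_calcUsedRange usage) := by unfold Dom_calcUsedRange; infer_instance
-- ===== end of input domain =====

-- B replaces A's rolling `index` accumulator with a two-pass decomposition (break-index table, then
-- consecutive-pair zip) — objective: alternative (same O(n) cost, different structure).


-- ===== PORT A =====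
-- A: rolling accumulator; i runs over 1..len-1, so every index is nonnegative and in bounds and
-- List.getD is exact for Python's usage[i]; usage[-1] on a nonempty list is getLastD.
def calcUsedRange (usage : List (Int × Int)) : List (Int × Int) :=
  match usage with
  | [] => []  -- Python raises IndexError on usage[0]; excluded by Pre_
  | u0 :: _ =>
    let s := (List.range' 1 (usage.length - 1)).foldl
      (fun (s : List (Int × Int) × Int) i =>
        if (usage.getD i (0, 0)).2 = 2 then
          (s.1 ++ [(s.2, (usage.getD (i - 1) (0, 0)).1)], (usage.getD i (0, 0)).1)
        else s)
      ([], u0.1)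
    s.1 ++ [(s.2, (usage.getLastD (0, 0)).1)]

-- ===== PORT B =====
-- B: break-index table, then consecutive pairs via zip; same exact-indexing remarks as above.
def calcUsedRange_alt (usage : List (Int × Int)) : List (Int × Int) :=
  if usage.isEmpty then []  -- Python raises IndexError on usage[breaks[-1]]; excluded by Pre_
  else
    let breaks : List Nat :=
      0 :: (List.range' 1 (usage.length - 1)).filter (fun i => (usage.getD i (0, 0)).2 == 2)
    let used := List.zipWith
      (fun a b => ((usage.getD a (0, 0)).1, (usage.getD (b - 1) (0, 0)).1))
      breaks (breaks.drop 1)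
    used ++ [((usage.getD (breaks.getLastD 0) (0, 0)).1, (usage.getLastD (0, 0)).1)]

-- ===== PRECONDITION & SPEC =====
-- Pre_ excludes exactly the empty list, on which Python A (and Python B) raise IndexError.
def Pre_calcUsedRange (usage : List (Int × Int)) : Prop := usage ≠ []
instance (usage : List (Int × Int)) : Decidable (Pre_calcUsedRange usage) := by unfold Pre_calcUsedRange; infer_instance
def pvWitness_calcUsedRange : (List (Int × Int)) := [(3, 2), (5, 1), (7, 2), (9, 0)]

def Spec_calcUsedRange (usage : List (Int × Int)) (out : List (Int × Int)) : Prop := out = calcUsedRange_alt usage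
instance (usage : List (Int × Int)) (out : List (Int × Int)) : Decidable (Spec_calcUsedRange usage out) := by unfold Spec_calcUsedRange; infer_instance

-- ===== CLAIM (what is proved, stated in full; the proofs are below) =====
def Claim_equal_calcUsedRange : Prop := ∀ (usage : List (Int × Int)), Dom_calcUsedRange usage → Pre_calcUsedRange usage → Spec_calcUsedRange usage (calcUsedRange usage)

-- ===== LEMMAS AND PROOFS =====

-- the table of break indices among 1..m
def pvF (usage : List (Int × Int)) (m : Nat) : List Nat :=
  (List.range' 1 m).filter (fun i => (usage.getD i (0, 0)).2 == 2)

-- consecutive-pair zip of a nonempty list extended by one element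
theorem pv_zip_concat' {α β : Type} (f : α → α → β) (t : List α) (b x : α) :
    List.zipWith f (b :: (t ++ [x])) (t ++ [x])
      = List.zipWith f (b :: t) t ++ [f (t.getLastD b) x] := by
  induction t generalizing b with
  | nil => simp [List.getLastD]
  | cons c u ih =>
    simp only [List.cons_append, List.zipWith_cons_cons]
    rw [ih c]
    simp only [List.getLastD_cons]

theorem pv_getLastD_concat (l : List Nat) (a d : Nat) : (l ++ [a]).getLastD d = a := by
  induction l generalizing d with
  | nil => rfl
  | cons b t ih =>
    simp only [List.cons_append, List.getLastD_cons]
    exact ih b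

-- the loop invariant: after processing i = 1..m, A's state is B's pair table and last break
theorem pv_invariant (usage : List (Int × Int)) (u0 : Int × Int) (rest : List (Int × Int))
    (hu : usage = u0 :: rest) (m : Nat) :
    (List.range' 1 m).foldl
      (fun (s : List (Int × Int) × Int) i =>
        if (usage.getD i (0, 0)).2 = 2 then
          (s.1 ++ [(s.2, (usage.getD (i - 1) (0, 0)).1)], (usage.getD i (0, 0)).1)
        else s)
      ([], u0.1)
    = (List.zipWith (fun a b => ((usage.getD a (0, 0)).1, (usage.getD (b - 1) (0, 0)).1))
         (0 :: pvF usage m) (pvF usage m),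
       (usage.getD ((0 :: pvF usage m).getLastD 0) (0, 0)).1) := by
  induction m with
  | zero => simp [pvF, hu]
  | succ m ih =>
    rw [List.range'_concat]
    simp only [one_mul]
    rw [List.foldl_append, ih]
    simp only [List.foldl_cons, List.foldl_nil]
    by_cases hP : (usage.getD (1 + m) (0, 0)).2 = 2
    · have hP' : ((usage.getD (1 + m) (0, 0)).2 == 2) = true := by simpa using hP
      have hF : pvF usage (m + 1) = pvF usage m ++ [1 + m] := by
        unfold pvF
        rw [List.range'_concat, one_mul, List.filter_append, List.filter_cons, if_pos hP',
          List.filter_nil]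
      rw [if_pos hP, hF, pv_zip_concat']
      simp only [List.getLastD_cons, pv_getLastD_concat]
    · have hP' : ((usage.getD (1 + m) (0, 0)).2 == 2) = false := by
        simp only [beq_eq_false_iff_ne, ne_eq]
        exact hP
      have hF : pvF usage (m + 1) = pvF usage m := by
        unfold pvF
        rw [List.range'_concat, one_mul, List.filter_append, List.filter_cons,
          if_neg (by rw [hP']; simp), List.filter_nil, List.append_nil]
      rw [if_neg hP, hF]

-- ===== VERDICT (by name: the statement is the Claim_ definition above) =====
theorem calcUsedRange_spec : Claim_equal_calcUsedRange := by
  intro usage _ hpre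
  unfold Spec_calcUsedRange calcUsedRange calcUsedRange_alt
  cases usage with
  | nil => exact absurd rfl hpre
  | cons u0 rest =>
    rw [if_neg (by simp)]
    simp only [pv_invariant (u0 :: rest) u0 rest rfl ((u0 :: rest).length - 1),
      List.drop_succ_cons, List.drop_zero, pvF]
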